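-- pv_equiv track=rewrite | github.com/CaoY123/container-number-identification | recognition.py | find_valleys
-- ===== SOURCE A (Python) =====
-- def find_valleys(projection, min_width=5, min_depth=15):
--     valleys = []
--     width = 0
--     start_idx = 0
--     for idx, value in enumerate(projection):
--         if value < min_depth:
--             if width == 0:
--                 start_idx = idx
--             width += 1
--         else:
--             if width >= min_width:
--                 valleys.append((start_idx, idx))
--             width = 0
--
--     # 添加最后一个区间
--     valleys.append((start_idx, len(projection)))
--
--     return valleys
-- ===== SOURCE B (Python) =====
-- def find_valleys(projection, min_width=5, min_depth=15):
--     # Run-based two-pointer scan: jump over each maximal below-threshold run at once.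
--     n = len(projection)
--     valleys = []
--     last_start = 0
--     i = 0
--     while i < n:
--         if projection[i] < min_depth:
--             j = i + 1
--             while j < n and projection[j] < min_depth:
--                 j += 1
--             last_start = i
--             if j < n and j - i >= min_width:
--                 valleys.append((i, j))
--             i = j
--         else:
--             i += 1
--     valleys.append((last_start, n))
--     return valleys
-- ===== Notes on version B (the rewrite author's own statement) =====
-- stated objective: alternative
-- what changed: Replaces A's per-element state machine (width counter and start index updated at every element) by a two-pointer scan that jumps over each maximal below-threshold run at once and appends the interval at the run boundary.
-- outside the precondition, e.g. on find_valleys([20, 20], 0, 15): A returns [(0, 0), (0, 1), (0, 2)], B returns [(0, 2)]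
import Mathlib
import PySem

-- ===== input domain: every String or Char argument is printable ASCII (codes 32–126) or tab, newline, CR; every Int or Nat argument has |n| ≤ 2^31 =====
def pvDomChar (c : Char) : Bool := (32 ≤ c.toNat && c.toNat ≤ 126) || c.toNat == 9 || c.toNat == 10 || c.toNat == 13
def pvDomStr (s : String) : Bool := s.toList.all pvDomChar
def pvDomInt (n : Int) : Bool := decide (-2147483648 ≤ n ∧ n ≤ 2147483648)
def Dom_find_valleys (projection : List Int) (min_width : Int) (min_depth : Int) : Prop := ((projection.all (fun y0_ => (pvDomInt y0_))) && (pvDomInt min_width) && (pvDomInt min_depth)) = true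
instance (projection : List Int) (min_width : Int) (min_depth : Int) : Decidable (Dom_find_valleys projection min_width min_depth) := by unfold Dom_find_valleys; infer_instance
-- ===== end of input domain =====

-- B replaces A's per-element width/start state machine by a run-based two-pointer scan that
-- jumps over each maximal below-threshold run at once (objective: alternative decomposition;
-- same O(n) cost).

-- ===== PORT A =====
-- A's loop body, one step of the fold over enumerate(projection); state = (valleys, width, start_idx)
def pvAStep (min_width min_depth : Int)
    (st : List (Int × Int) × Int × Int) (pr : Int × Int) : List (Int × Int) × Int × Int :=
  match st, pr with
  | (valleys, width, start_idx), (idx, value) =>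
    if value < min_depth then
      (valleys, width + 1, if width = 0 then idx else start_idx)
    else
      ((if width ≥ min_width then valleys ++ [(start_idx, idx)] else valleys), 0, start_idx)

def find_valleys (projection : List Int) (min_width : Int) (min_depth : Int) : List (Int × Int) :=
  let st := (PySem.List.enumerate projection).foldl (pvAStep min_width min_depth) ([], 0, 0)
  st.1 ++ [(st.2.2, (projection.length : Int))]

-- ===== PORT B =====
-- inner `while j < n and projection[j] < min_depth: j += 1`
-- (indices here are always in [0, n) with n = len(projection), so List.getD is exact for projection[j])
def pvAltScan (p : List Int) (min_depth : Int) (n : Nat) (j : Nat) : Nat :=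
  if h : j < n then
    if p.getD j 0 < min_depth then pvAltScan p min_depth n (j + 1) else j
  else j
termination_by n - j

-- used by pvAltGo's decreasing_by
theorem pvAltScan_ge (p : List Int) (min_depth : Int) (n j : Nat) : j ≤ pvAltScan p min_depth n j := by
  unfold pvAltScan
  split
  · split
    · have := pvAltScan_ge p min_depth n (j + 1); omega
    · exact le_refl j
  · exact le_refl j
termination_by n - j

-- outer `while i < n: …`
def pvAltGo (p : List Int) (min_width min_depth : Int) (n i last_start : Nat)
    (valleys : List (Int × Int)) : List (Int × Int) × Nat :=
  if h : i < n then
    if p.getD i 0 < min_depth then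
      let j := pvAltScan p min_depth n (i + 1)
      pvAltGo p min_width min_depth n j i
        (if j < n ∧ (j : Int) - (i : Int) ≥ min_width then valleys ++ [((i : Int), (j : Int))] else valleys)
    else pvAltGo p min_width min_depth n (i + 1) last_start valleys
  else (valleys, last_start)
termination_by n - i
decreasing_by
  · have := pvAltScan_ge p min_depth n (i + 1); omega
  · omega

def find_valleys_alt (projection : List Int) (min_width : Int) (min_depth : Int) : List (Int × Int) :=
  let r := pvAltGo projection min_width min_depth projection.length 0 0 []
  r.1 ++ [((r.2 : Int), (projection.length : Int))]

-- ===== PRECONDITION & SPEC =====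
-- Pre_ restricts min_width to the natural domain (a valley's minimum width is at least 1); for
-- min_width ≤ 0 A still returns, but appends a zero-width interval at every single
-- above-threshold index, a per-element artefact of its `width >= min_width` test on width 0.
def Pre_find_valleys (projection : List Int) (min_width : Int) (min_depth : Int) : Prop :=
  1 ≤ min_width
instance (projection : List Int) (min_width : Int) (min_depth : Int) : Decidable (Pre_find_valleys projection min_width min_depth) := by unfold Pre_find_valleys; infer_instance

def pvWitness_find_valleys : List Int × Int × Int := ([20, 3, 1, 30, 2], 2, 15)

def Spec_find_valleys (projection : List Int) (min_width : Int) (min_depth : Int) (out : List (Int × Int)) : Prop := out = find_valleys_alt projection min_width min_depth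
instance (projection : List Int) (min_width : Int) (min_depth : Int) (out : List (Int × Int)) : Decidable (Spec_find_valleys projection min_width min_depth out) := by unfold Spec_find_valleys; infer_instance

-- ===== CLAIM (what is proved, stated in full; the proofs are below) =====
def Claim_equal_find_valleys : Prop := ∀ (projection : List Int) (min_width : Int) (min_depth : Int), Dom_find_valleys projection min_width min_depth → Pre_find_valleys projection min_width min_depth → Spec_find_valleys projection min_width min_depth (find_valleys projection min_width min_depth)

-- ===== LEMMAS AND PROOFS =====

-- length of the maximal below-threshold prefix
def pvBelow (d : Int) : List Int → Nat
  | [] => 0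
  | x :: xs => if x < d then pvBelow d xs + 1 else 0

theorem pvBelow_le (d : Int) (xs : List Int) : pvBelow d xs ≤ xs.length := by
  induction xs with
  | nil => simp [pvBelow]
  | cons x xs ih => simp only [pvBelow, List.length_cons]; split <;> omega

theorem pvBelow_get (d : Int) (xs : List Int) (h : pvBelow d xs < xs.length) :
    ¬ xs[pvBelow d xs] < d := by
  induction xs with
  | nil => simp at h
  | cons x xs ih =>
    by_cases hx : x < d
    · have h' : pvBelow d xs < xs.length := by
        simp only [pvBelow, if_pos hx, List.length_cons] at h; omega
      simp only [pvBelow, if_pos hx]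
      simp [ih h']
    · simpa [pvBelow, hx] using hx

-- common run-based reference recursion both ports are reduced to
def pvSGo (mw d : Int) : List Int → Int → Int → List (Int × Int) → List (Int × Int) × Int
  | [], _, ls, acc => (acc, ls)
  | x :: xs, i, ls, acc =>
    if x < d then
      pvSGo mw d (xs.drop (pvBelow d xs)) (i + (1 + (pvBelow d xs : Int))) i
        (if pvBelow d xs < xs.length ∧ (1 + (pvBelow d xs : Int)) ≥ mw then
          acc ++ [(i, i + (1 + (pvBelow d xs : Int)))] else acc)
    else pvSGo mw d xs (i + 1) ls acc
termination_by l => l.length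
decreasing_by
  · simp only [List.length_drop, List.length_cons]; omega
  · simp only [List.length_cons]; omega

-- A-side run lemma: folding pvAStep from a state inside a below-run (width w ≥ 1)
theorem pvA_run (mw d : Int) (xs : List Int) (i : Int) (acc : List (Int × Int)) (w s : Int)
    (hw : 1 ≤ w) :
    (PySem.List.enumerate xs i).foldl (pvAStep mw d) (acc, w, s) =
      if pvBelow d xs < xs.length then
        (PySem.List.enumerate (xs.drop (pvBelow d xs + 1)) (i + (pvBelow d xs : Int) + 1)).foldl
          (pvAStep mw d)
          ((if w + (pvBelow d xs : Int) ≥ mw then acc ++ [(s, i + (pvBelow d xs : Int))] else acc), 0, s)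
      else (acc, w + (xs.length : Int), s) := by
  induction xs generalizing i w with
  | nil => rw [PySem.List.enumerate_nil]; simp [pvBelow]
  | cons x xs ih =>
    by_cases hx : x < d
    · have hw1 : ¬ (w = 0) := by omega
      rw [PySem.List.enumerate_cons, List.foldl_cons]
      simp only [pvAStep, if_pos hx, if_neg hw1]
      rw [ih (i + 1) (w + 1) (by omega)]
      simp only [pvBelow, if_pos hx, List.length_cons, List.drop_succ_cons]
      have hcnd : (pvBelow d xs < xs.length) = (pvBelow d xs + 1 < xs.length + 1) :=
        propext (by omega)
      have hcnd2 : (w + 1 + (pvBelow d xs : Int) ≥ mw) = (w + ((pvBelow d xs + 1 : Nat) : Int) ≥ mw) :=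
        propext (by push_cast; omega)
      have e1 : (i + 1 + (pvBelow d xs : Int) + 1) = (i + ((pvBelow d xs + 1 : Nat) : Int) + 1) := by
        push_cast; ring
      have e3 : (i + 1 + (pvBelow d xs : Int)) = (i + ((pvBelow d xs + 1 : Nat) : Int)) := by
        push_cast; ring
      have e4 : (w + 1 + (xs.length : Int)) = (w + ((xs.length + 1 : Nat) : Int)) := by
        push_cast; ring
      simp only [hcnd, hcnd2, e3, e4]
    · rw [PySem.List.enumerate_cons, List.foldl_cons]
      simp only [pvAStep, if_neg hx]
      simp only [pvBelow, if_neg hx, List.length_cons, List.drop_succ_cons, List.drop_zero]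
      rw [if_pos (show 0 < xs.length + 1 by omega)]
      norm_num

-- A-side main lemma: the fold from width 0 equals the reference recursion
theorem pvA_eq_sGo (mw d : Int) (hmw : 1 ≤ mw) (xs : List Int) (i s : Int)
    (acc : List (Int × Int)) :
    (fun r => (r.1, r.2.2)) ((PySem.List.enumerate xs i).foldl (pvAStep mw d) (acc, 0, s)) =
      pvSGo mw d xs i s acc := by
  induction hn : xs.length using Nat.strong_induction_on generalizing xs i s acc with
  | _ n ihn =>
  match xs with
  | [] => simp [PySem.List.enumerate_nil, pvSGo]
  | x :: xs =>
    by_cases hx : x < d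
    · rw [PySem.List.enumerate_cons, List.foldl_cons]
      simp only [pvAStep, if_pos hx]
      norm_num
      rw [pvA_run mw d xs (i + 1) acc 1 i (by omega)]
      by_cases hlt : pvBelow d xs < xs.length
      · rw [if_pos hlt]
        conv_rhs => rw [pvSGo]
        rw [if_pos hx]
        have hy : ¬ xs[pvBelow d xs] < d := pvBelow_get d xs hlt
        have hdrop : xs.drop (pvBelow d xs) = xs[pvBelow d xs] :: xs.drop (pvBelow d xs + 1) :=
          List.drop_eq_getElem_cons hlt
        rw [hdrop]
        conv_rhs => rw [pvSGo]
        rw [if_neg hy]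
        have hc2 : (pvBelow d xs < xs.length ∧ 1 + (pvBelow d xs : Int) ≥ mw) =
            (1 + (pvBelow d xs : Int) ≥ mw) := propext ⟨And.right, fun hh => ⟨hlt, hh⟩⟩
        simp only [hc2]
        have e : i + (1 + (pvBelow d xs : Int)) = i + 1 + (pvBelow d xs : Int) := by ring
        rw [e]
        have hrec := ihn (xs.drop (pvBelow d xs + 1)).length
          (by subst hn; simp only [List.length_drop, List.length_cons]; omega)
          (xs.drop (pvBelow d xs + 1)) (i + 1 + (pvBelow d xs : Int) + 1) i
          (if 1 + (pvBelow d xs : Int) ≥ mw then acc ++ [(i, i + 1 + (pvBelow d xs : Int))] else acc)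
          rfl
        simp only [] at hrec
        rw [← hrec]
      · rw [if_neg hlt]
        have hc : pvBelow d xs = xs.length := by have := pvBelow_le d xs; omega
        conv_rhs => rw [pvSGo]
        rw [if_pos hx]
        rw [show xs.drop (pvBelow d xs) = ([] : List Int) by rw [hc]; simp]
        conv_rhs => rw [pvSGo]
        rw [if_neg (show ¬ (pvBelow d xs < xs.length ∧ 1 + (pvBelow d xs : Int) ≥ mw) from
          fun hh => hlt hh.1)]
    · rw [PySem.List.enumerate_cons, List.foldl_cons]
      simp only [pvAStep, if_neg hx]
      rw [if_neg (show ¬ ((0 : Int) ≥ mw) by omega)]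
      have hrec := ihn xs.length (by subst hn; simp) xs (i + 1) s acc rfl
      simp only [] at hrec
      rw [hrec]
      conv_rhs => rw [pvSGo]
      rw [if_neg hx]

-- B-side: pvAltScan computes index + length of the below-run starting there
theorem pvAltScan_eq (p : List Int) (d : Int) :
    ∀ (k j : Nat), p.length - j ≤ k → pvAltScan p d p.length j = j + pvBelow d (p.drop j) := by
  intro k
  induction k with
  | zero =>
    intro j hj
    have hge : ¬ j < p.length := by omega
    rw [pvAltScan, dif_neg hge]
    rw [List.drop_eq_nil_of_le (by omega)]
    simp [pvBelow]
  | succ k ih =>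
    intro j hj
    by_cases h : j < p.length
    · have hdrop : p.drop j = p[j] :: p.drop (j + 1) := List.drop_eq_getElem_cons h
      have hgd : p.getD j 0 = p[j] := List.getD_eq_getElem p 0 h
      rw [pvAltScan, dif_pos h, hgd, hdrop]
      by_cases hx : p[j] < d
      · rw [if_pos hx, ih (j + 1) (by omega)]
        simp only [pvBelow, if_pos hx]
        omega
      · rw [if_neg hx]
        simp [pvBelow, hx]
    · rw [pvAltScan, dif_neg h]
      rw [List.drop_eq_nil_of_le (by omega)]
      simp [pvBelow]

-- B-side main lemma: the two-pointer loop equals the reference recursion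
theorem pvAltGo_eq_sGo (p : List Int) (mw d : Int) :
    ∀ (k i ls : Nat) (acc : List (Int × Int)), p.length - i ≤ k →
      (fun r => (r.1, (r.2 : Int))) (pvAltGo p mw d p.length i ls acc) =
        pvSGo mw d (p.drop i) (i : Int) (ls : Int) acc := by
  intro k
  induction k with
  | zero =>
    intro i ls acc hk
    have hge : ¬ i < p.length := by omega
    rw [pvAltGo, dif_neg hge]
    rw [List.drop_eq_nil_of_le (by omega)]
    rw [pvSGo]
  | succ k ih =>
    intro i ls acc hk
    by_cases h : i < p.length
    · have hdrop : p.drop i = p[i] :: p.drop (i + 1) := List.drop_eq_getElem_cons h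
      have hgd : p.getD i 0 = p[i] := List.getD_eq_getElem p 0 h
      rw [pvAltGo, dif_pos h, hgd, hdrop]
      by_cases hx : p[i] < d
      · rw [if_pos hx]
        conv_rhs => rw [pvSGo]
        rw [if_pos hx]
        have hscan : pvAltScan p d p.length (i + 1) = (i + 1) + pvBelow d (p.drop (i + 1)) :=
          pvAltScan_eq p d (p.length - (i + 1)) (i + 1) (le_refl _)
        set c := pvBelow d (p.drop (i + 1)) with hc
        have hcle : c ≤ (p.drop (i + 1)).length := pvBelow_le d _
        have hlen : (p.drop (i + 1)).length = p.length - (i + 1) := by simp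
        simp only [hscan]
        have hrec := ih (i + 1 + c) i
          (if i + 1 + c < p.length ∧ ((i + 1 + c : Nat) : Int) - (i : Int) ≥ mw
            then acc ++ [((i : Int), ((i + 1 + c : Nat) : Int))] else acc)
          (by omega)
        simp only [] at hrec
        rw [hrec]
        have hdd : p.drop (i + 1 + c) = (p.drop (i + 1)).drop c := by
          rw [List.drop_drop]
        rw [hdd]
        have hval : (((i + 1 + c : Nat) : Int)) = (i : Int) + (1 + (c : Int)) := by
          push_cast; ring
        rw [hval]
        congr 1
        rw [hlen]
        split_ifs with h1 h2 h2 <;> try rfl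
        · exfalso
          rw [hlen] at hcle
          omega
        · exfalso
          rw [hlen] at hcle
          omega
      · rw [if_neg hx]
        conv_rhs => rw [pvSGo]
        rw [if_neg hx]
        have hrec := ih (i + 1) ls acc (by omega)
        rw [hrec]
        norm_num
    · rw [pvAltGo, dif_neg h]
      rw [List.drop_eq_nil_of_le (by omega)]
      rw [pvSGo]

-- ===== VERDICT (by name: the statement is the Claim_ definition above) =====
theorem find_valleys_spec : Claim_equal_find_valleys := by
  intro projection min_width min_depth _hdom hpre
  have hA := pvA_eq_sGo min_width min_depth hpre projection 0 0 []
  have hB := pvAltGo_eq_sGo projection min_width min_depth projection.length 0 0 [] (by omega)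
  simp only [] at hA hB
  simp only [List.drop_zero, Nat.cast_zero] at hB
  rw [← hB] at hA
  rw [Prod.mk.injEq] at hA
  obtain ⟨h1, h2⟩ := hA
  simp only [Spec_find_valleys, find_valleys, find_valleys_alt]
  rw [h1, h2]
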